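-- pv_equiv track=rewrite | github.com/dcaballol/certificados_matricula | utils.py | formatear_run
-- ===== SOURCE A (Python) =====
-- def calcular_dv(run):
--     """
--     Calcula el dígito verificador de un RUN chileno
--
--     Args:
--         run (int o str): RUN sin dígito verificador
--
--     Returns:
--         str: Dígito verificador (0-9 o K)
--     """
--     run_str = str(run).replace(".", "").replace("-", "")
--
--     if not run_str.isdigit():
--         return None
--
--     run_int = int(run_str)
--
--     multiplicador = 2
--     suma = 0
--
--     while run_int > 0:
--         suma += (run_int % 10) * multiplicador
--         run_int //= 10
--         multiplicador += 1
--         if multiplicador > 7: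
--             multiplicador = 2
--
--     resto = suma % 11
--     dv = 11 - resto
--
--     if dv == 11:
--         return '0'
--     elif dv == 10:
--         return 'K'
--     else:
--         return str(dv)
--
-- def formatear_run(run, dv=None):
--     """
--     Formatea un RUN con puntos y guión
--
--     Args:
--         run (int o str): RUN sin formato
--         dv (str, optional): Dígito verificador. Si no se proporciona, se calcula.
--
--     Returns:
--         str: RUN formateado (ej: 12.345.678-9)
--     """
--     run_str = str(run).replace(".", "").replace("-", "")
--
--     if not run_str.isdigit():
--         return run
--
--     # Calcular DV si no se proporciona
--     if dv is None:
--         dv = calcular_dv(run_str)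
--
--     # Formatear con puntos
--     run_formateado = ""
--     contador = 0
--
--     for digito in reversed(run_str):
--         if contador > 0 and contador % 3 == 0:
--             run_formateado = "." + run_formateado
--         run_formateado = digito + run_formateado
--         contador += 1
--
--     return f"{run_formateado}-{dv}"
-- ===== SOURCE B (Python) =====
-- def calcular_dv(run):
--     """Digito verificador por lista de digitos y pesos 2 + i % 6 (sin multiplicador con reinicio)."""
--     run_str = str(run).replace(".", "").replace("-", "")
--     if not run_str.isdigit():
--         return None
--     n = int(run_str)
--     digits = []
--     while n > 0:
--         digits.append(n % 10)
--         n //= 10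
--     suma = sum(d * (2 + i % 6) for i, d in enumerate(digits))
--     dv = 11 - suma % 11
--     return 'K' if dv == 10 else str(dv % 11)
--
-- def formatear_run(run, dv=None):
--     """Formatea un RUN con puntos y guion: agrupa de a 3 desde la derecha y une con puntos."""
--     run_str = str(run).replace(".", "").replace("-", "")
--     if not run_str.isdigit():
--         return run
--     if dv is None:
--         dv = calcular_dv(run_str)
--     groups = []
--     s = run_str
--     while len(s) > 3:
--         groups.append(s[-3:])
--         s = s[:-3]
--     groups.append(s)
--     groups.reverse()
--     return ".".join(groups) + "-" + dv
-- ===== Notes on version B (the rewrite author's own statement) =====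
-- stated objective: simpler
-- what changed: DV is computed by extracting a digit list and summing with arithmetic weights 2+i%6 plus a two-way tail (K on 10, else str(dv mod 11)) instead of a fused while-loop with a resetting multiplier and a three-way if-chain, and formatting chunks the string into 3-char groups from the right and joins them with dots instead of the reversed char-by-char loop with a mod-3 counter.
import Mathlib
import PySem

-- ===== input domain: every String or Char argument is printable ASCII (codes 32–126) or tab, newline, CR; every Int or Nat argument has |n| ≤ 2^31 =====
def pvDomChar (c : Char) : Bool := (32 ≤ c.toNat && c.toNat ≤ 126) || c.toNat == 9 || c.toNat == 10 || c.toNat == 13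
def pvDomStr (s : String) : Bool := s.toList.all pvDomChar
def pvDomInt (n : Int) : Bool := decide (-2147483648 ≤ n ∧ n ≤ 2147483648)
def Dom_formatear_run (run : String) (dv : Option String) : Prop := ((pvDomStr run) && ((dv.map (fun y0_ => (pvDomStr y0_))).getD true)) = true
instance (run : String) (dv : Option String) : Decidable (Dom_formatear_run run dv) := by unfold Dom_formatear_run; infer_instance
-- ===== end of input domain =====

-- B computes the DV from an explicit digit list with arithmetic weights 2+i%6 and formats by
-- chunking into 3-char groups from the right joined with dots (objective: simpler decomposition).


-- ===== PORT A =====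
-- while run_int > 0: suma += (run_int % 10) * multiplicador; run_int //= 10; multiplicador += 1; if > 7: = 2
def dvSumA (n : Nat) (m : Nat) : Nat :=
  if n = 0 then 0
  else (n % 10) * m + dvSumA (n / 10) (if 7 < m + 1 then 2 else m + 1)
  decreasing_by exact Nat.div_lt_self (Nat.pos_of_ne_zero (by assumption)) (by omega)

def calcular_dvA (run : String) : Option String :=
  let run_str := PySem.Str.replace (PySem.Str.replace run "." "") "-" ""
  if PySem.Str.strIsdigit run_str = false then none
  else
    -- int(run_str) cannot raise here (run_str is all digits); the loop runs on the nonneg value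
    let run_int := (PySem.Int.ofStr? run_str).getD 0
    let suma := dvSumA run_int.toNat 2
    let resto := suma % 11
    let dvv := 11 - resto
    if dvv = 11 then some "0"
    else if dvv = 10 then some "K"
    else some (PySem.Int.toStr (dvv : Int))

-- for digito in reversed(run_str): if contador > 0 and contador % 3 == 0: prepend "."; prepend digito
def fmtLoopA : List Char → Nat → List Char → List Char
  | [], _, acc => acc
  | d :: rest, c, acc => fmtLoopA rest (c + 1) (d :: (if 0 < c ∧ c % 3 = 0 then '.' :: acc else acc))

def formatear_run (run : String) (dv : Option String) : String :=
  let run_str := PySem.Str.replace (PySem.Str.replace run "." "") "-" ""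
  if PySem.Str.strIsdigit run_str = false then run
  else
    let dvs := match dv with
      | some d => d
      | none => (calcular_dvA run_str).getD "None"   -- unreachable getD: run_str is all digits
    let fmt := fmtLoopA run_str.toList.reverse 0 []
    String.mk fmt ++ "-" ++ dvs

-- ===== PORT B =====
-- while n > 0: digits.append(n % 10); n //= 10
def digitsOfB (n : Nat) : List Nat :=
  if n = 0 then []
  else (n % 10) :: digitsOfB (n / 10)
  decreasing_by exact Nat.div_lt_self (Nat.pos_of_ne_zero (by assumption)) (by omega)

-- suma: weighted digit sum, weight of position i is 2 + i % 6
def sumWB : List Nat → Nat → Nat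
  | [], _ => 0
  | d :: rest, i => d * (2 + i % 6) + sumWB rest (i + 1)

def calcular_dvB (run : String) : Option String :=
  let run_str := PySem.Str.replace (PySem.Str.replace run "." "") "-" ""
  if PySem.Str.strIsdigit run_str = false then none
  else
    let n := (PySem.Int.ofStr? run_str).getD 0
    let suma := sumWB (digitsOfB n.toNat) 0
    let dvv := 11 - suma % 11
    if dvv = 10 then some "K" else some (PySem.Int.toStr ((dvv % 11 : Nat) : Int))

-- while len(s) > 3: groups.append(s[-3:]); s = s[:-3]
def chunkLoopB (s : List Char) (gs : List (List Char)) : List (List Char) :=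
  if 3 < s.length then chunkLoopB (s.take (s.length - 3)) (gs ++ [s.drop (s.length - 3)])
  else gs ++ [s]
  decreasing_by simp [List.length_take]; omega

def formatear_run_alt (run : String) (dv : Option String) : String :=
  let run_str := PySem.Str.replace (PySem.Str.replace run "." "") "-" ""
  if PySem.Str.strIsdigit run_str = false then run
  else
    let dvs := match dv with
      | some d => d
      | none => (calcular_dvB run_str).getD "None"
    let groups := (chunkLoopB run_str.toList []).reverse
    String.mk (PySem.Chars.join ['.'] groups) ++ "-" ++ dvs

-- ===== PRECONDITION & SPEC =====
def Spec_formatear_run (run : String) (dv : Option String) (out : String) : Prop := out = formatear_run_alt run dv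
instance (run : String) (dv : Option String) (out : String) : Decidable (Spec_formatear_run run dv out) := by unfold Spec_formatear_run; infer_instance

-- ===== CLAIM (what is proved, stated in full; the proofs are below) =====
def Claim_equal_formatear_run : Prop := ∀ (run : String) (dv : Option String), Dom_formatear_run run dv → Spec_formatear_run run dv (formatear_run run dv)

-- ===== LEMMAS AND PROOFS =====

-- A's fused DV loop equals B's digit-list sum with arithmetic weights.
theorem dvSumA_eq_sumWB (n : Nat) : ∀ i : Nat, dvSumA n (2 + i % 6) = sumWB (digitsOfB n) i := by
  induction n using Nat.strong_induction_on with
  | _ n ih =>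
    intro i
    rw [dvSumA, digitsOfB]
    by_cases h : n = 0
    · simp [h, sumWB]
    · simp only [h, if_false, sumWB]
      have hlt : n / 10 < n := Nat.div_lt_self (Nat.pos_of_ne_zero h) (by omega)
      have hm : (if 7 < 2 + i % 6 + 1 then 2 else 2 + i % 6 + 1) = 2 + (i + 1) % 6 := by
        by_cases h5 : i % 6 = 5
        · rw [if_pos (by omega)]; omega
        · rw [if_neg (by omega)]; omega
      rw [hm, ih _ hlt (i + 1)]

theorem calcular_dv_eq (s : String) : calcular_dvA s = calcular_dvB s := by
  unfold calcular_dvA calcular_dvB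
  by_cases h : PySem.Str.strIsdigit (PySem.Str.replace (PySem.Str.replace s "." "") "-" "") = false
  · rw [if_pos h, if_pos h]
  · rw [if_neg h, if_neg h]
    dsimp only
    set n := ((PySem.Int.ofStr? (PySem.Str.replace (PySem.Str.replace s "." "") "-" "")).getD 0).toNat with hn
    have hsum : dvSumA n 2 = sumWB (digitsOfB n) 0 := by
      have := dvSumA_eq_sumWB n 0
      simpa using this
    rw [hsum]
    set suma := sumWB (digitsOfB n) 0
    have h11 : suma % 11 < 11 := Nat.mod_lt _ (by omega)
    by_cases hz : suma % 11 = 0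
    · simp only [hz, Nat.sub_zero]
      decide
    · have hdv : 11 - suma % 11 ≠ 11 := by omega
      by_cases hk : 11 - suma % 11 = 10
      · rw [if_neg hdv, if_pos hk, if_pos hk]
      · have hmod : (11 - suma % 11) % 11 = 11 - suma % 11 := Nat.mod_eq_of_lt (by omega)
        rw [if_neg hdv, if_neg hk, if_neg hk, hmod]

-- the formatting loop ignores the exact counter value: only positivity and its residue mod 3 matter
theorem fmtLoopA_counter_congr (l : List Char) : ∀ c c' acc, 0 < c → 0 < c' → c % 3 = c' % 3 →
    fmtLoopA l c acc = fmtLoopA l c' acc := by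
  induction l with
  | nil => intros; rfl
  | cons d rest ih =>
    intro c c' acc hc hc' hm
    simp only [fmtLoopA, hc, hc', hm, true_and]
    exact ih (c + 1) (c' + 1) _ (by omega) (by omega) (by omega)

-- the closed recursive form of A's formatting loop (over the REVERSED character list)
def gFmt (r : List Char) : List Char :=
  if r.length ≤ 3 then r.reverse
  else gFmt (r.drop 3) ++ '.' :: (r.take 3).reverse
  decreasing_by simp; omega

theorem fmtLoopA_eq_gFmt (r : List Char) (acc : List Char) : fmtLoopA r 0 acc = gFmt r ++ acc := by
  match r with
  | [] => simp [fmtLoopA, gFmt]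
  | [a] => simp [fmtLoopA, gFmt]
  | [a, b] => simp [fmtLoopA, gFmt]
  | [a, b, c] => simp [fmtLoopA, gFmt]
  | a :: b :: c :: d :: r' =>
    have h1 : fmtLoopA (a :: b :: c :: d :: r') 0 acc
        = fmtLoopA r' 4 (d :: '.' :: c :: b :: a :: acc) := by
      simp [fmtLoopA]
    have h2 : fmtLoopA (d :: r') 0 ('.' :: c :: b :: a :: acc)
        = fmtLoopA r' 1 (d :: '.' :: c :: b :: a :: acc) := by
      simp [fmtLoopA]
    have h3 : fmtLoopA r' 4 (d :: '.' :: c :: b :: a :: acc)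
        = fmtLoopA r' 1 (d :: '.' :: c :: b :: a :: acc) :=
      fmtLoopA_counter_congr r' 4 1 _ (by omega) (by omega) (by omega)
    rw [h1, h3, ← h2, fmtLoopA_eq_gFmt (d :: r') ('.' :: c :: b :: a :: acc)]
    conv_rhs => rw [gFmt]
    simp only [List.length_cons]
    rw [if_neg (by omega)]
    simp
  termination_by r.length
  decreasing_by simp

-- B's chunk loop, accumulator peeled off
def chunkR (s : List Char) : List (List Char) :=
  if 3 < s.length then s.drop (s.length - 3) :: chunkR (s.take (s.length - 3))
  else [s]
  decreasing_by simp [List.length_take]; omega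

theorem chunkLoopB_eq (s : List Char) (gs : List (List Char)) :
    chunkLoopB s gs = gs ++ chunkR s := by
  rw [chunkLoopB, chunkR]
  by_cases h : 3 < s.length
  · rw [if_pos h, if_pos h, chunkLoopB_eq (s.take (s.length - 3))]
    simp
  · simp [h]
  termination_by s.length
  decreasing_by simp [List.length_take]; omega

theorem chunkR_ne_nil (s : List Char) : chunkR s ≠ [] := by
  rw [chunkR]
  split <;> simp

theorem join_append_singleton (sep : List Char) (xs : List (List Char)) (y : List Char)
    (h : xs ≠ []) : PySem.Chars.join sep (xs ++ [y]) = PySem.Chars.join sep xs ++ sep ++ y := by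
  induction xs with
  | nil => exact absurd rfl h
  | cons x xs ih =>
    match xs with
    | [] => simp [PySem.Chars.join_cons_cons, PySem.Chars.join_singleton]
    | x' :: xs' =>
      simp only [List.cons_append, PySem.Chars.join_cons_cons]
      rw [← List.cons_append, ih (by simp)]
      simp

theorem join_chunkR_rev (s : List Char) :
    PySem.Chars.join ['.'] (chunkR s).reverse = gFmt s.reverse := by
  rw [chunkR, gFmt]
  by_cases h : 3 < s.length
  · rw [if_pos h, if_neg (by simp; omega)]
    simp only [List.reverse_cons]
    rw [join_append_singleton _ _ _ (by simp [chunkR_ne_nil])]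
    rw [join_chunkR_rev (s.take (s.length - 3))]
    have hdrop : s.reverse.drop 3 = (s.take (s.length - 3)).reverse := by
      rw [List.drop_reverse]
    have htake : (s.reverse.take 3).reverse = s.drop (s.length - 3) := by
      rw [List.take_reverse, List.reverse_reverse]
    rw [hdrop, htake]
    simp
  · rw [if_neg h, if_pos (by simp; omega)]
    simp [PySem.Chars.join_singleton]
  termination_by s.length
  decreasing_by simp [List.length_take]; omega

-- ===== VERDICT (by name: the statement is the Claim_ definition above) =====
theorem formatear_run_spec : Claim_equal_formatear_run := by
  intro run dv _
  unfold Spec_formatear_run formatear_run formatear_run_alt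
  by_cases h : PySem.Str.strIsdigit (PySem.Str.replace (PySem.Str.replace run "." "") "-" "") = false
  · rw [if_pos h, if_pos h]
  · rw [if_neg h, if_neg h]
    simp only [fmtLoopA_eq_gFmt, chunkLoopB_eq, calcular_dv_eq, List.nil_append,
      List.append_nil, join_chunkR_rev]
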